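-- pv_equiv track=rewrite | github.com/MrBrantCode/unitest_baseline | mut_generate/mist_train_taco/taco_18883/solution.py | min_operations_to_diff_adjacent_chars
-- ===== SOURCE A (Python) =====
-- def min_operations_to_diff_adjacent_chars(S: str, K: int) -> int:
--     # If all characters in S are the same, the problem simplifies
--     if len(set(S)) == 1:
--         return len(S) * K // 2
--
--     # Count the number of operations needed within one copy of S
--     m = 0
--     j = 0
--     while j < len(S) - 1:
--         if S[j] == S[j + 1]:
--             m += 1
--             j += 1  # Skip the next character as it's part of the same sequence
--         j += 1
--
--     # Total operations for K copies of S
--     total_operations = m * K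
--
--     # Check if the first and last characters of S are the same
--     if S[0] == S[-1]:
--         # Adjust for the overlap between the last character of one copy and the first of the next
--         total_operations += K - 1
--
--     return total_operations
-- ===== SOURCE B (Python) =====
-- def min_operations_to_diff_adjacent_chars(S: str, K: int) -> int:
--     # Run-length decomposition: group S into maximal runs of equal characters.
--     runs = []  # list of [char, run_length]
--     for c in S:
--         if runs and runs[-1][0] == c:
--             runs[-1][1] += 1
--         else:
--             runs.append([c, 1])
--
--     # A single run means all characters are the same.
--     if len(runs) == 1:
--         return len(S) * K // 2
--
--     # Within one copy, each run of length n needs n // 2 changes.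
--     total = sum(n // 2 for _, n in runs) * K
--
--     # Flat adjustment for the seam between consecutive copies.
--     if S[0] == S[-1]:
--         total += K - 1
--     return total
-- ===== Notes on version B (the rewrite author's own statement) =====
-- stated objective: alternative
-- what changed: Replaces the index-skipping while loop with a run-length decomposition of S (one pass building maximal runs, then sum of len(run)//2), and detects the all-same case as 'exactly one run' instead of len(set(S))==1.
import Mathlib
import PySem

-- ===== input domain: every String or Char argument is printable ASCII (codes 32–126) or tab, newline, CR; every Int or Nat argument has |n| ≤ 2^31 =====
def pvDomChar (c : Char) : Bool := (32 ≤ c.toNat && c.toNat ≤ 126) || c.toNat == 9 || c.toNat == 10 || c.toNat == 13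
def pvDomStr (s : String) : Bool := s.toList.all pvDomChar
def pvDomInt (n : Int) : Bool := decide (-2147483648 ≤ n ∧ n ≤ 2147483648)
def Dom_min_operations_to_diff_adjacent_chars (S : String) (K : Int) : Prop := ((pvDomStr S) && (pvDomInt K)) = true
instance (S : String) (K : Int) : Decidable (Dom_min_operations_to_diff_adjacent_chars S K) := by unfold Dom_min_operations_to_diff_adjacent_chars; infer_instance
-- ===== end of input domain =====

-- B replaces A's index-skipping while loop by a run-length decomposition (one pass building
-- maximal runs, m = sum of len(run)//2) and detects the all-same case as "one run"; same cost.

-- ===== PORT A =====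
-- the while loop: j scans, skipping an extra position after each counted pair
def pvALoop (cs : List Char) (m : Int) (j : Nat) : Int :=
  if j < cs.length - 1 then
    if cs[j]? == cs[j+1]? then pvALoop cs (m+1) (j+2) else pvALoop cs m (j+1)
  else m
termination_by cs.length - 1 - j
decreasing_by all_goals omega

def min_operations_to_diff_adjacent_chars (S : String) (K : Int) : Int :=
  let cs := S.toList
  if (PySem.Set.ofList cs).length = 1 then
    PySem.Int.floordiv ((cs.length : Int) * K) 2
  else
    let m := pvALoop cs 0 0
    let total := m * K
    if PySem.List.pyGet? cs 0 == PySem.List.pyGet? cs (-1) then total + (K - 1) else total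

-- ===== PORT B =====
-- one step of the run-building loop: extend the last run or open a new one
def pvBFold (runs : List (Char × Int)) (c : Char) : List (Char × Int) :=
  match runs.getLast? with
  | some (c0, n) => if c0 == c then runs.dropLast ++ [(c0, n + 1)] else runs ++ [(c, 1)]
  | none => [(c, 1)]

def min_operations_to_diff_adjacent_chars_alt (S : String) (K : Int) : Int :=
  let cs := S.toList
  let runs := cs.foldl pvBFold []
  if runs.length = 1 then
    PySem.Int.floordiv ((cs.length : Int) * K) 2
  else
    let total := (runs.foldl (fun acc p => acc + PySem.Int.floordiv p.2 2) 0) * K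
    if PySem.List.pyGet? cs 0 == PySem.List.pyGet? cs (-1) then total + (K - 1) else total

-- ===== PRECONDITION & SPEC =====
-- Pre_ excludes only the empty string, on which the Python A raises IndexError at S[0]
-- (B raises there too).
def Pre_min_operations_to_diff_adjacent_chars (S : String) (K : Int) : Prop := S.toList ≠ []
instance (S : String) (K : Int) : Decidable (Pre_min_operations_to_diff_adjacent_chars S K) := by
  unfold Pre_min_operations_to_diff_adjacent_chars; infer_instance

def pvWitness_min_operations_to_diff_adjacent_chars : String × Int := ("aabcc", 3)

def Spec_min_operations_to_diff_adjacent_chars (S : String) (K : Int) (out : Int) : Prop := out = min_operations_to_diff_adjacent_chars_alt S K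
instance (S : String) (K : Int) (out : Int) : Decidable (Spec_min_operations_to_diff_adjacent_chars S K out) := by unfold Spec_min_operations_to_diff_adjacent_chars; infer_instance

-- ===== CLAIM (what is proved, stated in full; the proofs are below) =====
def Claim_equal_min_operations_to_diff_adjacent_chars : Prop := ∀ (S : String) (K : Int), Dom_min_operations_to_diff_adjacent_chars S K → Pre_min_operations_to_diff_adjacent_chars S K → Spec_min_operations_to_diff_adjacent_chars S K (min_operations_to_diff_adjacent_chars S K)

-- ===== LEMMAS AND PROOFS =====

-- ghost: A's pair count as a structural recursion on the list
def pvPairs : List Char → Int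
  | c :: d :: rest => if c = d then 1 + pvPairs rest else pvPairs (d :: rest)
  | _ => 0

-- ghost: run-length encoding with an open run (c0, n)
def pvRle (c0 : Char) (n : Int) : List Char → List (Char × Int)
  | [] => [(c0, n)]
  | c :: cs => if c = c0 then pvRle c0 (n+1) cs else (c0, n) :: pvRle c 1 cs

lemma pvPairs_short (l : List Char) (h : l.length ≤ 1) : pvPairs l = 0 := by
  match l with
  | [] => rfl
  | [c] => rfl
  | c :: d :: rest => simp at h

lemma pvALoop_eq (cs : List Char) (m : Int) (j : Nat) :
    pvALoop cs m j = m + pvPairs (cs.drop j) := by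
  fun_induction pvALoop cs m j with
  | case1 m j hlt heq ih =>
    have hj : j < cs.length := by omega
    have hj1 : j + 1 < cs.length := by omega
    have h1 : cs.drop j = cs[j] :: cs.drop (j+1) := List.drop_eq_getElem_cons hj
    have h2 : cs.drop (j+1) = cs[j+1] :: cs.drop (j+2) := List.drop_eq_getElem_cons hj1
    have heq' : cs[j] = cs[j+1] := by
      simp [List.getElem?_eq_getElem hj, List.getElem?_eq_getElem hj1] at heq
      exact heq
    rw [ih, h1, h2, pvPairs]
    simp [heq']; ring
  | case2 m j hlt heq ih =>
    have hj : j < cs.length := by omega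
    have hj1 : j + 1 < cs.length := by omega
    have h1 : cs.drop j = cs[j] :: cs.drop (j+1) := List.drop_eq_getElem_cons hj
    have h2 : cs.drop (j+1) = cs[j+1] :: cs.drop (j+2) := List.drop_eq_getElem_cons hj1
    have hne : ¬ cs[j] = cs[j+1] := by
      simp [List.getElem?_eq_getElem hj, List.getElem?_eq_getElem hj1] at heq
      exact heq
    rw [ih, h1, h2, pvPairs]
    rw [← h2]
    simp [hne]
  | case3 m j hge =>
    have : (cs.drop j).length ≤ 1 := by simp; omega
    rw [pvPairs_short _ this]; ring

-- a run of k copies of c followed by a tail not starting with c contributes k/2 pairs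
lemma pvPairs_replicate (c : Char) : ∀ (k : Nat) (t : List Char),
    (∀ d ∈ t.head?, d ≠ c) →
    pvPairs (List.replicate k c ++ t) = ((k / 2 : Nat) : Int) + pvPairs t := by
  intro k
  induction k using Nat.strong_induction_on with
  | _ k ih =>
    match k with
    | 0 => intro t _; simp
    | 1 =>
      intro t ht
      match t with
      | [] => simp [pvPairs]
      | d :: t' =>
        have : d ≠ c := ht d (by simp)
        simp [pvPairs, this.symm]
    | (k+2) =>
      intro t ht
      have : List.replicate (k+2) c ++ t = c :: c :: (List.replicate k c ++ t) := by
        simp [List.replicate_succ]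
      rw [this, pvPairs, ih k (by omega) t ht, if_pos rfl]
      have h2 : (k + 2) / 2 = k / 2 + 1 := by omega
      rw [h2]; push_cast; ring

-- B's foldl builds exactly pvRle
lemma pvFold_rle : ∀ (cs : List Char) (acc : List (Char × Int)) (c0 : Char) (n : Int),
    List.foldl pvBFold (acc ++ [(c0, n)]) cs = acc ++ pvRle c0 n cs := by
  intro cs
  induction cs with
  | nil => intro acc c0 n; simp [pvRle]
  | cons c cs ih =>
    intro acc c0 n
    rw [List.foldl_cons]
    by_cases h : c0 = c
    · have hstep : pvBFold (acc ++ [(c0, n)]) c = acc ++ [(c0, n + 1)] := by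
        simp [pvBFold, h]
      rw [hstep, ih acc c0 (n+1)]
      simp [pvRle, h.symm]
    · have hne : ¬ c = c0 := fun hc => h hc.symm
      have hstep : pvBFold (acc ++ [(c0, n)]) c = (acc ++ [(c0, n)]) ++ [(c, 1)] := by
        simp [pvBFold, h]
      rw [hstep, ih (acc ++ [(c0, n)]) c 1]
      simp [pvRle, hne]
  
lemma pvFold_rle_nil (c : Char) (cs : List Char) :
    (c :: cs).foldl pvBFold [] = pvRle c 1 cs := by
  rw [List.foldl_cons]
  have : pvBFold [] c = [] ++ [(c, 1)] := by simp [pvBFold]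
  rw [this, pvFold_rle]; simp

-- the sum of n//2 over the rle equals pvPairs
lemma pvRle_sum : ∀ (cs : List Char) (c0 : Char) (k : Nat), 0 < k →
    ((pvRle c0 (k : Int) cs).map (fun p => PySem.Int.floordiv p.2 2)).sum
      = pvPairs (List.replicate k c0 ++ cs) := by
  intro cs
  induction cs with
  | nil =>
    intro c0 k hk
    have h := pvPairs_replicate c0 k [] (by simp)
    simp [pvPairs] at h
    simp [pvRle, h]
  | cons c cs ih =>
    intro c0 k hk
    by_cases h : c = c0
    · have : pvRle c0 (k : Int) (c :: cs) = pvRle c0 ((k+1 : Nat) : Int) cs := by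
        simp [pvRle, h]
      rw [this, ih c0 (k+1) (by omega)]
      subst h
      simp [List.replicate_succ' (n := k)]
    · have hr : pvRle c0 (k : Int) (c :: cs) = (c0, (k:Int)) :: pvRle c 1 cs := by
        simp [pvRle, h]
      rw [hr]
      have h1 : ((1:Nat):Int) = (1:Int) := by norm_num
      rw [List.map_cons, List.sum_cons, ← h1, ih c 1 (by omega)]
      rw [pvPairs_replicate c0 k (c :: cs) (by simp [h])]
      simp

-- guard equivalences: both guards say "every character equals the first"
lemma pvRle_ne_nil (cs : List Char) (c0 : Char) (n : Int) : pvRle c0 n cs ≠ [] := by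
  induction cs generalizing c0 n with
  | nil => simp [pvRle]
  | cons c cs ih => simp [pvRle]; split_ifs <;> simp [ih]

lemma pvRle_len_one (cs : List Char) : ∀ (c0 : Char) (n : Int),
    ((pvRle c0 n cs).length = 1 ↔ ∀ x ∈ cs, x = c0) := by
  induction cs with
  | nil => intro c0 n; simp [pvRle]
  | cons c cs ih =>
    intro c0 n
    by_cases h : c = c0
    · simp [pvRle, h, ih c0 (n+1)]
    · simp [pvRle, h]
      exact pvRle_ne_nil cs c 1
  
lemma pvSet_len_one (c : Char) (rest : List Char) :
    ((PySem.Set.ofList (c :: rest)).length = 1 ↔ ∀ x ∈ rest, x = c) := by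
  constructor
  · intro hlen x hx
    have hxmem : x ∈ PySem.Set.ofList (c :: rest) := by
      rw [PySem.Set.mem_ofList]; exact List.mem_cons_of_mem _ hx
    have hcmem : c ∈ PySem.Set.ofList (c :: rest) := by
      rw [PySem.Set.mem_ofList]; exact List.mem_cons_self
    match hs : PySem.Set.ofList (c :: rest) with
    | [y] =>
      rw [hs] at hxmem hcmem
      simp at hxmem hcmem
      rw [hxmem, hcmem]
    | [] => rw [hs] at hcmem; simp at hcmem
    | y :: z :: t => rw [hs] at hlen; simp at hlen
  · intro hall
    have hsub : ∀ x ∈ PySem.Set.ofList (c :: rest), x = c := by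
      intro x hx
      rw [PySem.Set.mem_ofList] at hx
      rcases List.mem_cons.mp hx with h | h
      · exact h
      · exact hall x h
    have hnd : (PySem.Set.ofList (c :: rest)).Nodup := PySem.Set.nodup_ofList _
    have hcmem : c ∈ PySem.Set.ofList (c :: rest) := by
      rw [PySem.Set.mem_ofList]; exact List.mem_cons_self
    match hs : PySem.Set.ofList (c :: rest) with
    | [] => rw [hs] at hcmem; simp at hcmem
    | [y] => simp
    | y :: z :: t =>
      rw [hs] at hsub hnd
      have hy := hsub y (by simp)
      have hz := hsub z (by simp)
      simp [hy, hz] at hnd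

-- main computation: on a nonempty string the two ports agree
lemma pvMain (c : Char) (rest : List Char) (K : Int) (S : String) (hS : S.toList = c :: rest) :
    min_operations_to_diff_adjacent_chars S K = min_operations_to_diff_adjacent_chars_alt S K := by
  unfold min_operations_to_diff_adjacent_chars min_operations_to_diff_adjacent_chars_alt
  rw [hS]
  have hruns : (c :: rest).foldl pvBFold [] = pvRle c 1 rest := pvFold_rle_nil c rest
  have hguard : ((PySem.Set.ofList (c :: rest)).length = 1) ↔
      (((c :: rest).foldl pvBFold []).length = 1) := by
    rw [hruns, pvSet_len_one, pvRle_len_one]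
  by_cases hg : (PySem.Set.ofList (c :: rest)).length = 1
  · simp only [hg, hguard.mp hg, if_pos]
  · have hg' : ¬ ((c :: rest).foldl pvBFold []).length = 1 := fun h => hg (hguard.mpr h)
    simp only [hg, hg', if_false]
    have hm : pvALoop (c :: rest) 0 0 =
        (((c :: rest).foldl pvBFold []).map (fun p => PySem.Int.floordiv p.2 2)).sum := by
      rw [pvALoop_eq, hruns]
      have h1 : ((1:Nat):Int) = (1:Int) := by norm_num
      rw [← h1, pvRle_sum rest c 1 (by omega)]
      simp
    have hsum : ((c :: rest).foldl pvBFold []).foldl (fun acc p => acc + PySem.Int.floordiv p.2 2) 0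
        = (((c :: rest).foldl pvBFold []).map (fun p => PySem.Int.floordiv p.2 2)).sum := by
      rw [PySem.List.foldl_add]; simp
    rw [hm, hsum]

-- ===== VERDICT (by name: the statement is the Claim_ definition above) =====
theorem min_operations_to_diff_adjacent_chars_spec : Claim_equal_min_operations_to_diff_adjacent_chars := by
  intro S K _ hpre
  unfold Spec_min_operations_to_diff_adjacent_chars
  unfold Pre_min_operations_to_diff_adjacent_chars at hpre
  match h : S.toList with
  | [] => exact absurd h hpre
  | c :: rest => exact pvMain c rest K S h
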